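-- pv_equiv track=rewrite | github.com/sominshim/Algorithm | 백준/Gold/1107. 리모컨/리모컨.py | can_type
-- ===== SOURCE A (Python) =====
-- def can_type(num, broken):
--     """숫자 버튼만 눌러서 `num`을 입력할 수 있는지 확인"""
--     if num == 0:
--         return 0 not in broken
--     while num:
--         if num % 10 in broken:
--             return False
--         num //= 10
--     return True
-- ===== SOURCE B (Python) =====
-- def can_type(num, broken):
--     """숫자 버튼만 눌러서 `num`을 입력할 수 있는지 확인"""
--     return all(int(d) not in broken for d in str(num))
-- ===== Notes on version B (the rewrite author's own statement) =====
-- stated objective: simpler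
-- what changed: B tests the characters of str(num) with a single all(...) instead of peeling digits with %10 and //10 in a while loop, dropping A's special num==0 branch.
-- outside the precondition, e.g. on can_type(-2, [8, 9]): A returns False, B raises ValueError
import Mathlib
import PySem

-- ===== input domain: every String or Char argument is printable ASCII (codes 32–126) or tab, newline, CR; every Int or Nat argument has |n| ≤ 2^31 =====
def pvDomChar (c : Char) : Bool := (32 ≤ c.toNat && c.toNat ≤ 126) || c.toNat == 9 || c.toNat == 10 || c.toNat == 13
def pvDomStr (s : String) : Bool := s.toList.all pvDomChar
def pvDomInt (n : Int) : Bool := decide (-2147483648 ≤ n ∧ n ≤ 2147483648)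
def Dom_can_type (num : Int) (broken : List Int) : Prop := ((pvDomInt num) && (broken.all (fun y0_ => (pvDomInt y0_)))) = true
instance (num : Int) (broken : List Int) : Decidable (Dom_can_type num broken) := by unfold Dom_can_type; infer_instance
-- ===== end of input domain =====

-- B replaces A's %10 / //10 digit-peeling while-loop (with its num==0 special case) by one
-- all(...) over the characters of str(num); same cost, shorter.

-- ===== PORT A =====
-- the while-loop of A; on Pre_ (0 ≤ num) Python's num % 10 / num //= 10 coincide with Nat % and /
def canTypeLoopA (broken : List Int) (n : Nat) : Bool :=
  if n = 0 then true
  else if broken.contains ((n % 10 : Nat) : Int) then false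
  else canTypeLoopA broken (n / 10)
decreasing_by exact Nat.div_lt_self (Nat.pos_of_ne_zero (by assumption)) (by omega)

def can_type (num : Int) (broken : List Int) : Bool :=
  if num = 0 then !(broken.contains 0)
  else canTypeLoopA broken num.toNat

-- ===== PORT B =====
-- all(int(d) not in broken for d in str(num)); int(d) on a decimal digit char d is its code − 48
-- (exact on the digit characters str(num) yields for num ≥ 0).
def can_type_alt (num : Int) (broken : List Int) : Bool :=
  (PySem.Int.toChars num).all (fun d => !(broken.contains ((d.toNat : Int) - 48)))

-- ===== PRECONDITION & SPEC =====
-- Pre_ excludes negative num: there B raises ValueError on int('-'), while A either loops forever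
-- (num //= 10 stalls at -1) or, when a floor-mod residue happens to be broken, returns an accidental False.
def Pre_can_type (num : Int) (_broken : List Int) : Prop := 0 ≤ num
instance (num : Int) (broken : List Int) : Decidable (Pre_can_type num broken) := by unfold Pre_can_type; infer_instance
def pvWitness_can_type : Int × List Int := (523, [7, 8, 9])

def Spec_can_type (num : Int) (broken : List Int) (out : Bool) : Prop := out = can_type_alt num broken
instance (num : Int) (broken : List Int) (out : Bool) : Decidable (Spec_can_type num broken out) := by unfold Spec_can_type; infer_instance

-- ===== CLAIM (what is proved, stated in full; the proofs are below) =====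
def Claim_equal_can_type : Prop := ∀ (num : Int) (broken : List Int), Dom_can_type num broken → Pre_can_type num broken → Spec_can_type num broken (can_type num broken)

-- ===== LEMMAS AND PROOFS =====

lemma pred_digitChar (broken : List Int) (m : Nat) (hm : m < 10) :
    (!(broken.contains (((Nat.digitChar m).toNat : Int) - 48))) = !(broken.contains (m : Int)) := by
  interval_cases m <;> simp [Nat.digitChar]

lemma canTypeLoopA_pos (broken : List Int) (n : Nat) (hn : 0 < n) :
    canTypeLoopA broken n
      = (!(broken.contains ((n % 10 : Nat) : Int)) && canTypeLoopA broken (n / 10)) := by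
  rw [canTypeLoopA, if_neg (by omega)]
  cases hb : broken.contains ((n % 10 : Nat) : Int) <;> simp [hb]

lemma toDigitsCore_all (broken : List Int) (f : Nat) :
    ∀ (n : Nat) (ds : List Char), 0 < n → n ≤ f →
      (Nat.toDigitsCore 10 f n ds).all (fun d => !(broken.contains ((d.toNat : Int) - 48)))
        = (canTypeLoopA broken n
           && ds.all (fun d => !(broken.contains ((d.toNat : Int) - 48)))) := by
  induction f with
  | zero => intro n ds hn hle; omega
  | succ f ih =>
    intro n ds hn hle
    rw [Nat.toDigitsCore]
    have hc := pred_digitChar broken (n % 10) (Nat.mod_lt n (by omega))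
    by_cases h0 : n / 10 = 0
    · rw [if_pos h0, canTypeLoopA_pos broken n hn, h0]
      simp only [List.all_cons, hc]
      simp [canTypeLoopA]
    · rw [if_neg h0,
          ih (n / 10) _ (Nat.pos_of_ne_zero h0)
            (by have := Nat.div_lt_self hn (by omega : (1:Nat) < 10); omega),
          canTypeLoopA_pos broken n hn]
      simp only [List.all_cons, hc]
      cases broken.contains ((n % 10 : Nat) : Int) <;>
        cases canTypeLoopA broken (n / 10) <;> simp

-- ===== VERDICT (by name: the statement is the Claim_ definition above) =====
theorem can_type_spec : Claim_equal_can_type := by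
  intro num broken _ hpre
  have hnum : 0 ≤ num := hpre
  unfold Spec_can_type can_type can_type_alt PySem.Int.toChars
  rw [if_neg (by omega : ¬ num < 0)]
  by_cases h : num = 0
  · subst h
    simp [Nat.toDigits, Nat.toDigitsCore, Nat.digitChar]
  · rw [if_neg h]
    have hn : 0 < num.toNat := by omega
    rw [Nat.toDigits,
        toDigitsCore_all broken (num.toNat + 1) num.toNat [] hn (by omega)]
    simp
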